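-- pv_equiv track=rewrite | github.com/purvanshi/operation-prediction | test_aris.py | chunck_question
-- ===== SOURCE A (Python) =====
-- def chunck_question(question):
--     '''Takes out question part from the whole question
--     '''
--     question_word=["How","When","What","Find","Calculate","how"]
--     tokens = [token.lower() for token in question_word]
--     p=0
--     list_q=[]
--     query=[]
--     for i in question:
--         current_question=[]
--         current_query=[]
--         for j in i.split():
--             if (len(current_query)==0):
--                 if j in question_word:
--                     current_query.append(j)
--                 else:
--                     current_question.append(j)
--             elif(len(current_query)>0):
--                 current_query.append(j)
--         cq=" ".join(current_question)
--         cque=" ".join(current_query)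
--         list_q.append(cq)
--         query.append(cque)
--     return list_q,query
-- ===== SOURCE B (Python) =====
-- def chunck_question(question):
--     qset = {"How", "When", "What", "Find", "Calculate", "how"}
--     list_q = []
--     query = []
--     for sentence in question:
--         words = sentence.split()
--         idx = next((i for i, w in enumerate(words) if w in qset), None)
--         if idx is None:
--             before, after = words, []
--         else:
--             before, after = words[:idx], words[idx:]
--         list_q.append(" ".join(before))
--         query.append(" ".join(after))
--     return list_q, query
-- ===== Notes on version B (the rewrite author's own statement) =====
-- stated objective: idiomatic
-- what changed: B replaces A's stateful word-by-word accumulation into two growing lists with a find-first-index (next over enumerate against a set of question words) followed by slicing the word list at that index.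
import Mathlib
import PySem

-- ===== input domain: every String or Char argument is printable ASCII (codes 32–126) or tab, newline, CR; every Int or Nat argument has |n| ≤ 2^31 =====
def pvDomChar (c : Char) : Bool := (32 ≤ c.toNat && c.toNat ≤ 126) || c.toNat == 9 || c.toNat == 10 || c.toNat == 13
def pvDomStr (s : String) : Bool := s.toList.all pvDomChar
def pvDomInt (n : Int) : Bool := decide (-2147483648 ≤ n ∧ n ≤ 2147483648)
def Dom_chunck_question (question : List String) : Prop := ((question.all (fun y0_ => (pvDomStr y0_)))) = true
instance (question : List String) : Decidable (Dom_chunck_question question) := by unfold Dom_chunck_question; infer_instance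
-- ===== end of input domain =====

-- B replaces A's stateful two-accumulator scan by find-first-index + slice; same cost (alternative decomposition).
-- ===== PORT A =====
def pvQuestionWord : List String := ["How", "When", "What", "Find", "Calculate", "how"]

-- inner loop of A over the words of one sentence, state (current_question, current_query)
def pvInnerA (words : List String) : List String × List String :=
  words.foldl
    (fun (st : List String × List String) j =>
      if st.2.length == 0 then
        if j ∈ pvQuestionWord then (st.1, st.2 ++ [j]) else (st.1 ++ [j], st.2)
      else (st.1, st.2 ++ [j]))
    ([], [])

def chunck_question (question : List String) : List String × List String :=
  question.foldl
    (fun (st : List String × List String) i =>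
      let p := pvInnerA (PySem.Str.split₀ i)
      (st.1 ++ [PySem.Str.join " " p.1], st.2 ++ [PySem.Str.join " " p.2]))
    ([], [])

-- ===== PORT B =====
def pvQSet : PySem.Set String := PySem.Set.ofList ["How", "When", "What", "Find", "Calculate", "how"]

def chunck_question_alt (question : List String) : List String × List String :=
  let pairs := question.map (fun sentence =>
    let words := PySem.Str.split₀ sentence
    match (PySem.List.enumerate words).find? (fun iw => PySem.Set.contains pvQSet iw.2) with
    | none => (PySem.Str.join " " words, PySem.Str.join " " ([] : List String))
    | some iw => (PySem.Str.join " " (PySem.List.slice words none (some iw.1)),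
                  PySem.Str.join " " (PySem.List.slice words (some iw.1) none)))
  (pairs.map Prod.fst, pairs.map Prod.snd)

-- ===== PRECONDITION & SPEC =====
def Spec_chunck_question (question : List String) (out : List String × List String) : Prop := out = chunck_question_alt question
instance (question : List String) (out : List String × List String) : Decidable (Spec_chunck_question question out) := by unfold Spec_chunck_question; infer_instance

-- ===== CLAIM (what is proved, stated in full; the proofs are below) =====
def Claim_equal_chunck_question : Prop := ∀ (question : List String), Dom_chunck_question question → Spec_chunck_question question (chunck_question question)

-- ===== LEMMAS AND PROOFS =====

-- the predicate "word is NOT a question word" (A keeps scanning while it holds)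
def pvG (w : String) : Bool := !(PySem.Set.contains pvQSet w)

lemma pvMem_qset (w : String) : w ∈ pvQSet ↔ w ∈ pvQuestionWord :=
  PySem.Set.mem_ofList _ _

-- A's inner loop once the query list is nonempty: everything goes to the query
lemma pvInnerA_go_nonempty : ∀ (ws cq : List String) (qh : String) (qt : List String),
    ws.foldl
      (fun (st : List String × List String) j =>
        if st.2.length == 0 then
          if j ∈ pvQuestionWord then (st.1, st.2 ++ [j]) else (st.1 ++ [j], st.2)
        else (st.1, st.2 ++ [j]))
      (cq, qh :: qt) = (cq, (qh :: qt) ++ ws) := by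
  intro ws
  induction ws with
  | nil => intro cq qh qt; simp [List.foldl]
  | cons w ws ih =>
    intro cq qh qt
    simp only [List.foldl_cons, List.cons_append]
    rw [if_neg (by simp)]
    rw [ih]
    simp

-- A's inner loop with empty query: takeWhile / dropWhile on "not a question word"
lemma pvInnerA_go_empty : ∀ (ws cq : List String),
    ws.foldl
      (fun (st : List String × List String) j =>
        if st.2.length == 0 then
          if j ∈ pvQuestionWord then (st.1, st.2 ++ [j]) else (st.1 ++ [j], st.2)
        else (st.1, st.2 ++ [j]))
      (cq, []) = (cq ++ ws.takeWhile pvG, ws.dropWhile pvG) := by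
  intro ws
  induction ws with
  | nil => intro cq; simp [List.foldl]
  | cons w ws ih =>
    intro cq
    simp only [List.foldl_cons, List.length_nil]
    rw [if_pos (by simp)]
    by_cases h : w ∈ pvQuestionWord
    · have hg : pvG w = false := by simp [pvG, pvMem_qset, h]
      rw [if_pos h]
      simp only [List.nil_append]
      rw [pvInnerA_go_nonempty ws cq w []]
      simp [hg]
    · have hg : pvG w = true := by simp [pvG, pvMem_qset, h]
      rw [if_neg h]
      rw [ih]
      simp [hg, List.append_assoc]

lemma pvInnerA_eq (ws : List String) :
    pvInnerA ws = (ws.takeWhile pvG, ws.dropWhile pvG) := by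
  unfold pvInnerA
  rw [pvInnerA_go_empty]
  simp

-- B's find? over enumerate, characterised by takeWhile / dropWhile
lemma pvFindEnum : ∀ (ws : List String) (s : Int),
    (PySem.List.enumerate ws s).find? (fun iw => PySem.Set.contains pvQSet iw.2) =
      (match ws.dropWhile pvG with
       | [] => none
       | w :: _ => some (s + ((ws.takeWhile pvG).length : Int), w)) := by
  intro ws
  induction ws with
  | nil => intro s; simp [PySem.List.enumerate_nil]
  | cons w ws ih =>
    intro s
    rw [PySem.List.enumerate_cons]
    by_cases h : w ∈ pvQuestionWord
    · have hg : pvG w = false := by simp [pvG, pvMem_qset, h]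
      simp [pvMem_qset, h, hg]
    · have hg : pvG w = true := by simp [pvG, pvMem_qset, h]
      rw [List.find?_cons_of_neg (by simp [pvMem_qset, h])]
      rw [ih (s + 1)]
      simp only [List.takeWhile_cons, List.dropWhile_cons, hg, if_true]
      cases hdw : ws.dropWhile pvG with
      | nil => simp
      | cons d ds =>
        simp only [List.length_cons, Option.some.injEq, Prod.mk.injEq]
        exact ⟨by push_cast; ring, trivial⟩

-- B's per-sentence pair equals the joins of A's inner-loop result
lemma pvSentence_eq (ws : List String) :
    (match (PySem.List.enumerate ws 0).find? (fun iw => PySem.Set.contains pvQSet iw.2) with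
     | none => (PySem.Str.join " " ws, PySem.Str.join " " ([] : List String))
     | some iw => (PySem.Str.join " " (PySem.List.slice ws none (some iw.1)),
                   PySem.Str.join " " (PySem.List.slice ws (some iw.1) none)))
      = (PySem.Str.join " " (ws.takeWhile pvG), PySem.Str.join " " (ws.dropWhile pvG)) := by
  rw [pvFindEnum ws 0]
  have hsplit : ws.takeWhile pvG ++ ws.dropWhile pvG = ws :=
    List.takeWhile_append_dropWhile
  cases hdw : ws.dropWhile pvG with
  | nil =>
    have htw : ws.takeWhile pvG = ws := by
      rw [hdw] at hsplit; simpa using hsplit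
    simp [htw]
  | cons d ds =>
    simp only [Int.zero_add]
    generalize htw : ws.takeWhile pvG = tw at hsplit ⊢
    rw [hdw] at hsplit
    have h1 : PySem.List.slice ws none (some (tw.length : Int)) = tw := by
      rw [PySem.List.slice_to_natCast]
      conv_lhs => rw [← hsplit]
      exact List.take_left
    have h2 : PySem.List.slice ws (some (tw.length : Int)) none = ws.dropWhile pvG := by
      rw [PySem.List.slice_from_natCast]
      conv_lhs => rw [← hsplit]
      rw [List.drop_left]
      exact hdw.symm
    simp [h1, h2, hdw]

-- A's outer loop in map form
lemma pvFoldPair (f1 f2 : String → String) : ∀ (qs a b : List String),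
    qs.foldl (fun (st : List String × List String) i => (st.1 ++ [f1 i], st.2 ++ [f2 i])) (a, b)
      = (a ++ qs.map f1, b ++ qs.map f2) := by
  intro qs
  induction qs with
  | nil => intro a b; simp [List.foldl]
  | cons q qs ih => intro a b; simp only [List.foldl_cons, List.map_cons]; rw [ih]; simp

-- ===== VERDICT (by name: the statement is the Claim_ definition above) =====
theorem chunck_question_spec : Claim_equal_chunck_question := by
  intro question _
  unfold Spec_chunck_question chunck_question chunck_question_alt
  rw [pvFoldPair (fun i => PySem.Str.join " " (pvInnerA (PySem.Str.split₀ i)).1)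
      (fun i => PySem.Str.join " " (pvInnerA (PySem.Str.split₀ i)).2) question [] []]
  simp only [List.nil_append, List.map_map, Prod.mk.injEq]
  refine ⟨?_, ?_⟩ <;>
  · apply List.map_congr_left
    intro s _
    simp only [Function.comp_apply]
    rw [pvSentence_eq (PySem.Str.split₀ s), pvInnerA_eq]
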